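-- pv_equiv track=rewrite | github.com/ivansg44/AMR-TV | stub_0/data_parser.py | get_species_color_dict
-- ===== SOURCE A (Python) =====
-- def get_species_color_dict(sample_species_list):
--     """Assign colors to species.
--
--     The colors assigned are unique for up to 12 species. After 12, the
--     colors are repeated.
--
--     :param sample_species_list: Species to assign colors to
--     :type sample_species_list: list
--     :return: Dict of format {species: color}
--     :rtype: dict
--     """
--     color_opts = ["#8dd3c7",
--                   "#ffffb3",
--                   "#bebada",
--                   "#fb8072",
--                   "#80b1d3",
--                   "#fdb462",
--                   "#b3de69",
--                   "#fccde5",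
--                   "#d9d9d9",
--                   "#bc80bd",
--                   "#ccebc5",
--                   "#ffed6f"]
--     species_tbl = dict.fromkeys(sample_species_list)
--     species_color_dict = \
--         {species: color for species, color in zip(species_tbl, color_opts)}
--     return species_color_dict
-- ===== SOURCE B (Python) =====
-- def get_species_color_dict(sample_species_list):
--     """Recursive decomposition: give the first species the first color,
--     remove all its occurrences from the rest, and recurse with the
--     remaining colors; recursion ends when species or colors run out."""
--     color_opts = ["#8dd3c7",
--                   "#ffffb3",
--                   "#bebada",
--                   "#fb8072",
--                   "#80b1d3",
--                   "#fdb462",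
--                   "#b3de69",
--                   "#fccde5",
--                   "#d9d9d9",
--                   "#bc80bd",
--                   "#ccebc5",
--                   "#ffed6f"]
--
--     def assign(species, colors):
--         if not species or not colors:
--             return {}
--         head = species[0]
--         d = {head: colors[0]}
--         d.update(assign([s for s in species[1:] if s != head], colors[1:]))
--         return d
--
--     return assign(sample_species_list, color_opts)
-- ===== Notes on version B (the rewrite author's own statement) =====
-- stated objective: alternative
-- what changed: Replaces A's staged dedup-with-dict.fromkeys then zip-with-colors pipeline by a recursive selection: the first species takes the first color, every occurrence of it is filtered out of the remainder, and the recursion continues on the filtered list with the remaining colors, ending when species or the 12 colors run out.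
import Mathlib
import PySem

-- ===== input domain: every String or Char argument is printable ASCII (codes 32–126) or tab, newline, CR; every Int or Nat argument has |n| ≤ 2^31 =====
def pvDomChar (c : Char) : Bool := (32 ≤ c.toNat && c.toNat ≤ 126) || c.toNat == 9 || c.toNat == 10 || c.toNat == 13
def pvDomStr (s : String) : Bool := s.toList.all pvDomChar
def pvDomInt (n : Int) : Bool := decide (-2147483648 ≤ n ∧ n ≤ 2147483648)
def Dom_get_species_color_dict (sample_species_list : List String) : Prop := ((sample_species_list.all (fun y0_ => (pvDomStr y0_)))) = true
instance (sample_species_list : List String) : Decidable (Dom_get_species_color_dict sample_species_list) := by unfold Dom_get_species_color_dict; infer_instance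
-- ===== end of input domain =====

-- B replaces A's dedup-then-zip-then-dict-comprehension pipeline by a recursive decomposition:
-- the first species gets the first color, all its occurrences are filtered out of the rest,
-- and the recursion continues with the remaining colors (objective: alternative).

-- ===== PORT A =====
-- the color_opts literal shared by both Pythons
def colorOpts : List String :=
  ["#8dd3c7", "#ffffb3", "#bebada", "#fb8072", "#80b1d3", "#fdb462",
   "#b3de69", "#fccde5", "#d9d9d9", "#bc80bd", "#ccebc5", "#ffed6f"]

def get_species_color_dict (sample_species_list : List String) : List (String × String) :=
  -- species_tbl = dict.fromkeys(sample_species_list); iterating it yields its keys in order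
  let species_tbl : List String := PySem.List.dedup sample_species_list
  -- {species: color for species, color in zip(species_tbl, color_opts)}
  ((species_tbl.zip colorOpts).foldl
      (fun d p => PySem.Dict.insert d p.1 p.2)
      (PySem.Dict.empty : PySem.Dict String String)).items

-- ===== PORT B =====
-- assign(species, colors): if either is empty return {}; else d = {head: colors[0]},
-- d.update(assign([s for s in species[1:] if s != head], colors[1:])); return d
def altAssign : List String → List String → PySem.Dict String String
  | [], _ => PySem.Dict.empty
  | _ :: _, [] => PySem.Dict.empty
  | h :: t, c :: cs =>
      (PySem.Dict.mk [(h, c)]).update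
        (altAssign (t.filter (fun s => s != h)) cs).items
termination_by species _ => species.length
decreasing_by simpa using Nat.lt_succ_of_le (List.length_filter_le _ t)

def get_species_color_dict_alt (sample_species_list : List String) : List (String × String) :=
  (altAssign sample_species_list colorOpts).items

-- ===== PRECONDITION & SPEC =====
def Spec_get_species_color_dict (sample_species_list : List String) (out : List (String × String)) : Prop := out = get_species_color_dict_alt sample_species_list
instance (sample_species_list : List String) (out : List (String × String)) : Decidable (Spec_get_species_color_dict sample_species_list out) := by unfold Spec_get_species_color_dict; infer_instance

-- ===== CLAIM (what is proved, stated in full; the proofs are below) =====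
def Claim_equal_get_species_color_dict : Prop := ∀ (sample_species_list : List String), Dom_get_species_color_dict sample_species_list → Spec_get_species_color_dict sample_species_list (get_species_color_dict sample_species_list)

-- ===== LEMMAS AND PROOFS =====

-- map fst of a zip is the take at the shorter length
theorem map_fst_zip_eq_take {α β : Type} (l : List α) (cs : List β) :
    (l.zip cs).map Prod.fst = l.take cs.length := by
  induction l generalizing cs with
  | nil => simp
  | cons x l ih => cases cs with
    | nil => simp
    | cons c cs => simp [ih]

-- updating a set already containing h ignores the occurrences of h in the added list
theorem set_update_filter (t : List String) (s : PySem.Set String) (h : String)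
    (hm : h ∈ s) : PySem.Set.update s t = PySem.Set.update s (t.filter (fun x => x != h)) := by
  induction t generalizing s with
  | nil => simp
  | cons x t ih =>
    by_cases hx : x = h
    · subst hx
      rw [List.filter_cons_of_neg (by simp), PySem.Set.update_cons,
        PySem.Set.add_of_mem hm]
      exact ih s hm
    · rw [List.filter_cons_of_pos (by simpa using hx), PySem.Set.update_cons,
        PySem.Set.update_cons]
      exact ih (PySem.Set.add s x) ((PySem.Set.mem_add s x h).mpr (Or.inl hm))

-- an element in front of the accumulator that never occurs in the added list stays in front
theorem set_update_cons_head (t : List String) (s : PySem.Set String) (h : String)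
    (hn : h ∉ t) : PySem.Set.update (h :: s) t = h :: PySem.Set.update s t := by
  induction t generalizing s with
  | nil => simp
  | cons x t ih =>
    have hxh : x ≠ h := fun e => hn (e ▸ List.mem_cons_self)
    have hadd : PySem.Set.add (h :: s) x = h :: PySem.Set.add s x := by
      by_cases hxs : x ∈ s
      · rw [PySem.Set.add_of_mem hxs,
          PySem.Set.add_of_mem (List.mem_cons_of_mem h hxs)]
      · rw [PySem.Set.add_of_not_mem hxs,
          PySem.Set.add_of_not_mem (by simp [hxh, hxs]), List.cons_append]
    rw [PySem.Set.update_cons, PySem.Set.update_cons, hadd]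
    exact ih (PySem.Set.add s x) (fun hm => hn (List.mem_cons_of_mem x hm))

-- dict.fromkeys order: head first, then the dedup of the tail with the head removed
theorem dedup_cons_filter (h : String) (t : List String) :
    PySem.List.dedup (h :: t) = h :: PySem.List.dedup (t.filter (fun x => x != h)) := by
  have h1 : PySem.List.dedup (h :: t) = PySem.Set.update [h] t := by
    show PySem.Set.update PySem.Set.empty (h :: t) = _
    rw [PySem.Set.update_cons,
      show PySem.Set.add PySem.Set.empty h = [h] from PySem.Set.add_of_not_mem (List.not_mem_nil)]
  have hnotin : h ∉ t.filter (fun x => x != h) := by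
    intro hm
    have := List.of_mem_filter hm
    simp at this
  rw [h1, set_update_filter t [h] h List.mem_cons_self,
    set_update_cons_head _ [] h hnotin]
  rfl

-- B's recursion produces exactly the zip of the dedup with the colors
theorem altAssign_items_aux : ∀ (n : Nat) (l cs : List String), l.length ≤ n →
    (altAssign l cs).items = (PySem.List.dedup l).zip cs := by
  intro n
  induction n with
  | zero =>
    intro l cs hl
    rw [List.length_eq_zero_iff.mp (Nat.le_zero.mp hl)]
    cases cs <;> simp [altAssign, PySem.Dict.empty, PySem.List.dedup, PySem.Set.ofList, PySem.Set.empty]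
  | succ n ihn =>
    intro l cs hl
    match l, cs with
    | [], cs => cases cs <;> simp [altAssign, PySem.Dict.empty, PySem.List.dedup, PySem.Set.ofList, PySem.Set.empty]
    | h :: t, [] => simp [altAssign, PySem.Dict.empty]
    | h :: t, c :: cs =>
    have ih : (altAssign (t.filter (fun s => s != h)) cs).items
        = (PySem.List.dedup (t.filter (fun s => s != h))).zip cs :=
      ihn _ cs (le_trans (List.length_filter_le _ t) (by simpa using hl))
    rw [altAssign, dedup_cons_filter, List.zip_cons_cons, ← ih]
    show (List.foldl (fun acc p => acc.insert p.1 p.2) (PySem.Dict.mk [(h, c)])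
        (altAssign (t.filter (fun s => s != h)) cs).items).items = _
    rw [PySem.Dict.items_foldl_insert_fresh
        ((altAssign (t.filter (fun s => s != h)) cs).items) Prod.fst Prod.snd
        (PySem.Dict.mk [(h, c)])
        (by
          intro p hp
          obtain ⟨a, b⟩ := p
          rw [PySem.Dict.contains_mk]
          have hp1 : a ∈ PySem.List.dedup (t.filter (fun s => s != h)) := by
            rw [ih] at hp
            exact (List.of_mem_zip hp).1
          rw [PySem.List.mem_dedup] at hp1
          have hne : a ≠ h := by simpa using List.of_mem_filter hp1
          simp only [List.any_cons, List.any_nil, Bool.or_false]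
          exact beq_eq_false_iff_ne.mpr (Ne.symm hne))
        (by
          rw [ih, map_fst_zip_eq_take]
          exact List.Nodup.sublist (List.take_sublist _ _)
            (PySem.List.nodup_dedup _))]
    simp

theorem altAssign_items (l cs : List String) :
    (altAssign l cs).items = (PySem.List.dedup l).zip cs :=
  altAssign_items_aux l.length l cs le_rfl

-- A's dict comprehension over the distinct-keyed zip list is that list itself
theorem portA_eq_zip (l : List String) :
    get_species_color_dict l = (PySem.List.dedup l).zip colorOpts := by
  unfold get_species_color_dict
  simp only [PySem.List.dedup_eq_ofList]
  have hnd : ((((PySem.Set.ofList l).zip colorOpts)).map Prod.fst).Nodup := by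
    rw [map_fst_zip_eq_take]
    exact List.Nodup.sublist (List.take_sublist _ _) (PySem.Set.nodup_ofList l)
  rw [PySem.Dict.items_foldl_insert_fresh ((PySem.Set.ofList l).zip colorOpts)
        Prod.fst Prod.snd PySem.Dict.empty (fun a _ => by simp [PySem.Dict.contains_empty]) hnd]
  simp [PySem.Dict.empty]

-- ===== VERDICT (by name: the statement is the Claim_ definition above) =====
theorem get_species_color_dict_spec : Claim_equal_get_species_color_dict := by
  intro l _
  unfold Spec_get_species_color_dict get_species_color_dict_alt
  rw [portA_eq_zip, altAssign_items]
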